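-- pv_equiv track=rewrite | github.com/ahadx-12/potato-to-bacon | src/potatobacon/tariff/levers.py | _dimension_for_diff
-- ===== SOURCE A (Python) =====
-- from typing import Callable, Dict, Iterable, List, Mapping, Sequence
--
-- def _dimension_for_key(fact_key: str) -> str | None:
--     if fact_key.startswith("material_"):
--         return "material"
--     if fact_key.startswith("surface_contact_") or fact_key.startswith("felt_covering_"):
--         return "composition"
--     if fact_key.startswith("fiber_") or fact_key.startswith("upper_material_") or fact_key.startswith(
--         "outer_sole_material_"
--     ):
--         return "composition"
--     if "assembly" in fact_key or fact_key.startswith("product_type_assembly"):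
--         return "assembly"
--     return None
--
-- def _dimension_for_diff(diff_keys: Iterable[str]) -> str | None:
--     dimension: str | None = None
--     for key in diff_keys:
--         key_dimension = _dimension_for_key(key)
--         if key_dimension is None:
--             return None
--         if dimension is None:
--             dimension = key_dimension
--         elif dimension != key_dimension:
--             return None
--     return dimension
-- ===== SOURCE B (Python) =====
-- _PREFIX_DIMS = (
--     ("material_", "material"),
--     ("surface_contact_", "composition"),
--     ("felt_covering_", "composition"),
--     ("fiber_", "composition"),
--     ("upper_material_", "composition"),
--     ("outer_sole_material_", "composition"),
-- )
--
-- def _classify(key):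
--     # table-driven classifier: first matching prefix wins; otherwise the
--     # assembly substring rule (which subsumes the product_type_assembly prefix)
--     for prefix, dim in _PREFIX_DIMS:
--         if key.startswith(prefix):
--             return dim
--     if "assembly" in key:
--         return "assembly"
--     return None
--
-- def _dimension_for_diff(diff_keys):
--     keys = list(diff_keys)
--     if not keys:
--         return None
--     # staged whole-list passes: try each candidate dimension in turn
--     for dim in ("material", "composition", "assembly"):
--         if all(_classify(k) == dim for k in keys):
--             return dim
--     return None
-- ===== Notes on version B (the rewrite author's own statement) =====
-- stated objective: alternative
-- what changed: B replaces A's single accumulator loop over keys with a table-driven classifier plus staged whole-list passes: for each of the three candidate dimensions in turn it checks whether every key classifies as that dimension, returning the first that fits and None otherwise.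
import Mathlib
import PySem

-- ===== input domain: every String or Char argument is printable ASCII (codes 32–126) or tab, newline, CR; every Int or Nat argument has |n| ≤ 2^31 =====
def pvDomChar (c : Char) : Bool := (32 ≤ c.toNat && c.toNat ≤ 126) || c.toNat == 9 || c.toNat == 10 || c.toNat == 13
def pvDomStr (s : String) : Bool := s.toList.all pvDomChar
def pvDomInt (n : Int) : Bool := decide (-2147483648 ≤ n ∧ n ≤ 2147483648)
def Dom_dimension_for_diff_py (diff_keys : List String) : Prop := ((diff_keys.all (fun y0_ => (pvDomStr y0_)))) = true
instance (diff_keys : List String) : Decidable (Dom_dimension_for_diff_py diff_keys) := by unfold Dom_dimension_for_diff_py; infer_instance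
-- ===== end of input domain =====

-- B replaces A's accumulator loop with a table-driven classifier and staged
-- whole-list passes over the three candidate dimensions (objective: alternative).

-- ===== PORT A =====
-- module helper _dimension_for_key, as A writes it (if-chain)
def dimForKey (fact_key : String) : Option String :=
  if PySem.Str.startswith fact_key "material_" then some "material"
  else if PySem.Str.startswith fact_key "surface_contact_" || PySem.Str.startswith fact_key "felt_covering_" then some "composition"
  else if PySem.Str.startswith fact_key "fiber_" || PySem.Str.startswith fact_key "upper_material_" || PySem.Str.startswith fact_key "outer_sole_material_" then some "composition"
  else if PySem.Str.isIn "assembly" fact_key || PySem.Str.startswith fact_key "product_type_assembly" then some "assembly"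
  else none

-- A's for-loop with the running 'dimension' accumulator and early returns
def dimLoopA : List String → Option String → Option String
  | [], dimension => dimension
  | key :: rest, dimension =>
    match dimForKey key with
    | none => none
    | some kd =>
      match dimension with
      | none => dimLoopA rest (some kd)
      | some d => if d ≠ kd then none else dimLoopA rest (some d)

def dimension_for_diff_py (diff_keys : List String) : Option String :=
  dimLoopA diff_keys none

-- ===== PORT B =====
-- B's prefix table and table-driven _classify (loop over the table = find?)
def prefixDims : List (String × String) :=
  [("material_", "material"), ("surface_contact_", "composition"),
   ("felt_covering_", "composition"), ("fiber_", "composition"),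
   ("upper_material_", "composition"), ("outer_sole_material_", "composition")]

def classifyB (key : String) : Option String :=
  match prefixDims.find? (fun pd => PySem.Str.startswith key pd.1) with
  | some pd => some pd.2
  | none => if PySem.Str.isIn "assembly" key then some "assembly" else none

-- B: empty check, then one pass per candidate dimension (loop with all(...) = find?)
def dimension_for_diff_py_alt (diff_keys : List String) : Option String :=
  if diff_keys = [] then none
  else
    match (["material", "composition", "assembly"]).find?
        (fun dim => diff_keys.all (fun k => classifyB k == some dim)) with
    | some dim => some dim
    | none => none

-- ===== PRECONDITION & SPEC =====
def Spec_dimension_for_diff_py (diff_keys : List String) (out : Option String) : Prop := out = dimension_for_diff_py_alt diff_keys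
instance (diff_keys : List String) (out : Option String) : Decidable (Spec_dimension_for_diff_py diff_keys out) := by unfold Spec_dimension_for_diff_py; infer_instance

-- ===== CLAIM (what is proved, stated in full; the proofs are below) =====
def Claim_equal_dimension_for_diff_py : Prop := ∀ (diff_keys : List String), Dom_dimension_for_diff_py diff_keys → Spec_dimension_for_diff_py diff_keys (dimension_for_diff_py diff_keys)

-- ===== LEMMAS AND PROOFS =====

-- a key with the "product_type_assembly" prefix always contains "assembly"
lemma pta_isIn (k : String) (h : PySem.Str.startswith k "product_type_assembly" = true) :
    PySem.Str.isIn "assembly" k = true := by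
  rw [PySem.Str.isIn_iff_infix]
  have h' : "product_type_assembly".toList <+: k.toList := by
    exact (PySem.Chars.startswith_iff _ _).1 (by simpa using h)
  exact List.IsInfix.trans
    (by decide : "assembly".toList <:+: "product_type_assembly".toList) h'.isInfix

-- the two classifiers agree key by key (the "product_type_assembly" prefix test
-- is subsumed by the "assembly" substring test)
lemma classifyB_eq_dimForKey (k : String) : classifyB k = dimForKey k := by
  have hor : (PySem.Str.isIn "assembly" k || PySem.Str.startswith k "product_type_assembly")
      = PySem.Str.isIn "assembly" k := by
    cases h8 : PySem.Str.startswith k "product_type_assembly"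
    · simp
    · simpa using pta_isIn k h8
  unfold classifyB dimForKey prefixDims
  rw [hor]
  simp only [List.find?_cons, List.find?_nil]
  cases PySem.Str.startswith k "material_" <;>
  cases PySem.Str.startswith k "surface_contact_" <;>
  cases PySem.Str.startswith k "felt_covering_" <;>
  cases PySem.Str.startswith k "fiber_" <;>
  cases PySem.Str.startswith k "upper_material_" <;>
  cases PySem.Str.startswith k "outer_sole_material_" <;>
  cases PySem.Str.isIn "assembly" k <;> rfl

-- dimForKey returns one of the three dimensions or none
lemma dimForKey_cases (k : String) :
    dimForKey k = none ∨ dimForKey k = some "material" ∨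
    dimForKey k = some "composition" ∨ dimForKey k = some "assembly" := by
  unfold dimForKey; split_ifs <;> simp

-- A's loop with a committed dimension d returns d iff every remaining key classifies as d
lemma dimLoopA_some (l : List String) (d : String) :
    dimLoopA l (some d) = if ∀ k ∈ l, dimForKey k = some d then some d else none := by
  induction l with
  | nil => simp [dimLoopA]
  | cons k rest ih =>
    simp only [dimLoopA]
    cases hk : dimForKey k with
    | none => simp [hk]
    | some kd =>
      by_cases hdk : d = kd
      · subst hdk; simp [hk, ih]
      · simp [hk, hdk]
        exact fun h => absurd h.symm hdk

-- B's per-dimension pass succeeds iff every key classifies as that dimension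
lemma allPass_iff (l : List String) (d : String) :
    (l.all (fun k => classifyB k == some d)) = true ↔ ∀ k ∈ l, dimForKey k = some d := by
  simp [List.all_eq_true, classifyB_eq_dimForKey]

theorem dimension_for_diff_py_spec' (diff_keys : List String) :
    dimension_for_diff_py diff_keys = dimension_for_diff_py_alt diff_keys := by
  cases diff_keys with
  | nil => rfl
  | cons k rest =>
    simp only [dimension_for_diff_py, dimension_for_diff_py_alt, dimLoopA,
      if_neg (List.cons_ne_nil k rest)]
    cases hk : dimForKey k with
    | none =>
      -- A returns None; every pass of B fails at k
      have hfail : ∀ d, ((k :: rest).all (fun x => classifyB x == some d)) = false := by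
        intro d
        rw [← Bool.not_eq_true]
        intro hall
        have := (allPass_iff _ _).1 hall k (by simp)
        simp [hk] at this
      simp [List.find?_nil, hfail]
    | some d =>
      show dimLoopA rest (some d) = _
      rw [dimLoopA_some]
      by_cases hall : ∀ x ∈ rest, dimForKey x = some d
      · -- all keys classify as d: exactly the pass for d succeeds
        have hd : ((k :: rest).all (fun x => classifyB x == some d)) = true := by
          rw [allPass_iff]
          intro x hx
          rcases List.mem_cons.1 hx with rfl | hx'
          · exact hk
          · exact hall x hx'
        have hother : ∀ d', d' ≠ d → ((k :: rest).all (fun x => classifyB x == some d')) = false := by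
          intro d' hne
          rw [← Bool.not_eq_true]
          intro h
          have := (allPass_iff _ _).1 h k (by simp)
          rw [hk] at this
          exact hne (Option.some.inj this).symm
        rw [if_pos hall]
        rcases dimForKey_cases k with h | h | h | h <;> rw [hk] at h
        · exact absurd h (by simp)
        · obtain rfl : d = "material" := Option.some.inj h
          simp only [List.find?_cons, hd]
        · obtain rfl : d = "composition" := Option.some.inj h
          simp only [List.find?_cons, hd, hother "material" (by decide)]
        · obtain rfl : d = "assembly" := Option.some.inj h
          simp only [List.find?_cons, hd, hother "material" (by decide),
            hother "composition" (by decide)]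
      · -- mismatch in rest: A returns None, and no pass of B succeeds
        have hfail : ∀ d', ((k :: rest).all (fun x => classifyB x == some d')) = false := by
          intro d'
          rw [← Bool.not_eq_true]
          intro h
          have hall' := (allPass_iff _ _).1 h
          have hkd : d' = d := by
            have := hall' k (by simp); rw [hk] at this; exact (Option.some.inj this).symm
          subst hkd
          exact hall (fun x hx => hall' x (by simp [hx]))
        rw [if_neg hall]
        simp [List.find?_nil, hfail]

-- ===== VERDICT (by name: the statement is the Claim_ definition above) =====
theorem dimension_for_diff_py_spec : Claim_equal_dimension_for_diff_py := by
  intro diff_keys _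
  exact dimension_for_diff_py_spec' diff_keys
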